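-- pv_equiv track=rewrite | github.com/HyunwooKoh/CodingTest | programmers/level3/sol_12938.py | solution
-- ===== SOURCE A (Python) =====
-- def solution(n, s):
--     if n > s:
--         return [-1]
--     answer = []
--     qt = s // n
--     for _ in range(n):
--         answer.append(qt)
--     it = len(answer) -1
--     for _ in range(s % n):
--         answer[it] += 1
--         it -= 1
--     return answer
-- ===== SOURCE B (Python) =====
-- def solution(n, s):
--     if n > s:
--         return [-1]
--     answer = []
--     for i in range(n, 0, -1):
--         q = s // i
--         answer.append(q)
--         s -= q
--     return answer
-- ===== Notes on version B (the rewrite author's own statement) =====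
-- stated objective: alternative
-- what changed: Replaces A's fill-with-one-precomputed-quotient-then-increment-the-tail-in-place scheme by a single greedy pass that computes a fresh floor division s//i of the remaining budget for each remaining slot i = n..1 and subtracts it, never mutating an emitted element.
import Mathlib
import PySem

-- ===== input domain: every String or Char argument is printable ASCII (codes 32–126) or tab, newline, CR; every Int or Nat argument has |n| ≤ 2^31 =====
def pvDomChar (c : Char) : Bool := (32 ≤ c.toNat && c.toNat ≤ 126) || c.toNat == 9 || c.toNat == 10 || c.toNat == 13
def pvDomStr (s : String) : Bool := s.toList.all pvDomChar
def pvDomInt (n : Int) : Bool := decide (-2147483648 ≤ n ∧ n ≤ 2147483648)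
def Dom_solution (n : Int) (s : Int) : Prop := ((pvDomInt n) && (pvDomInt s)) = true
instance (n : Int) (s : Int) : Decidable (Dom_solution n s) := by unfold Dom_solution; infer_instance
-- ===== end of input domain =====

-- B replaces A's fill-then-increment-the-tail scheme by a greedy per-slot floor
-- division of the remaining budget (objective: alternative, same cost).


-- ===== PORT A =====
-- `answer[it] += 1` is ported as set/getD at index it.toNat: whenever that loop runs
-- in Python (n > 0), it is a valid non-negative index, so this is exact there.
def solution (n : Int) (s : Int) : List Int :=
  if n > s then [-1]
  else
    let qt := PySem.Int.floordiv s n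
    let answer := (PySem.List.pyRange 0 n 1).foldl (fun acc _ => acc ++ [qt]) []
    let it : Int := (answer.length : Int) - 1
    let st := (PySem.List.pyRange 0 (PySem.Int.mod s n) 1).foldl
        (fun (st : List Int × Int) _ =>
          (st.1.set st.2.toNat (st.1.getD st.2.toNat 0 + 1), st.2 - 1)) (answer, it)
    st.1

-- ===== PORT B =====
def solution_alt (n : Int) (s : Int) : List Int :=
  if n > s then [-1]
  else
    let st := (PySem.List.pyRange n 0 (-1)).foldl
        (fun (st : List Int × Int) i =>
          let q := PySem.Int.floordiv st.2 i
          (st.1 ++ [q], st.2 - q)) ([], s)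
    st.1

-- ===== PRECONDITION & SPEC =====
-- Pre_ excludes exactly the inputs where Python A raises ZeroDivisionError:
-- n = 0 with 0 ≤ s (the guard n > s does not fire and s // n divides by zero).
def Pre_solution (n : Int) (s : Int) : Prop := ¬ (n = 0 ∧ 0 ≤ s)
instance (n : Int) (s : Int) : Decidable (Pre_solution n s) := by unfold Pre_solution; infer_instance
def pvWitness_solution : Int × Int := (3, 11)
def Spec_solution (n : Int) (s : Int) (out : List Int) : Prop := out = solution_alt n s
instance (n : Int) (s : Int) (out : List Int) : Decidable (Spec_solution n s out) := by unfold Spec_solution; infer_instance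

-- ===== CLAIM (what is proved, stated in full; the proofs are below) =====
def Claim_equal_solution : Prop := ∀ (n : Int) (s : Int), Dom_solution n s → Pre_solution n s → Spec_solution n s (solution n s)

-- ===== LEMMAS AND PROOFS =====

-- A's mutation loop, run k times on a block of L copies of q, turns the last k into q+1
lemma solution_loop (q : Int) : ∀ (k L : Nat), k ≤ L →
    (List.range k).foldl
        (fun (st : List Int × Int) _ =>
          (st.1.set st.2.toNat (st.1.getD st.2.toNat 0 + 1), st.2 - 1))
        (List.replicate L q, (L : Int) - 1)
      = (List.replicate (L - k) q ++ List.replicate k (q + 1), (L : Int) - 1 - k) := by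
  intro k
  induction k with
  | zero => intro L _; simp
  | succ k ih =>
    intro L hk
    rw [List.range_succ, List.foldl_append, ih L (by omega)]
    have hidx : ((L : Int) - 1 - k).toNat = L - 1 - k := by omega
    have hlt : L - 1 - k < L - k := by omega
    simp only [List.foldl_cons, List.foldl_nil, hidx, Prod.mk.injEq]
    refine ⟨?_, by push_cast; omega⟩
    · rw [List.getD_append _ _ _ _ (by simp; omega),
        List.set_append_left _ _ (by simp; omega)]
      simp only [List.getD_eq_getElem?_getD, List.getElem?_replicate]
      rw [if_pos hlt]
      rw [show List.replicate (L - k) q = List.replicate (L - k - 1) q ++ [q] by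
        rw [← List.replicate_succ']; congr 1; omega]
      rw [List.set_append_right _ _ (by simp; omega)]
      simp only [List.length_replicate]
      rw [show L - 1 - k - (L - k - 1) = 0 by omega]
      simp only [List.set_cons_zero, Option.getD_some, List.append_assoc, List.singleton_append]
      rw [← List.replicate_succ]
      congr 1

-- B's greedy loop over i = m, m-1, …, 1: emits the two homogeneous blocks of s's
-- balanced partition into m parts, lower values first.
lemma solution_greedy : ∀ (m : Nat), 0 < m → ∀ (s : Int) (ans0 : List Int),
    ((PySem.List.pyRange (m : Int) 0 (-1)).foldl
        (fun (st : List Int × Int) i =>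
          (st.1 ++ [PySem.Int.floordiv st.2 i], st.2 - PySem.Int.floordiv st.2 i)) (ans0, s)).1
      = ans0 ++ List.replicate (m - (PySem.Int.mod s m).toNat) (PySem.Int.floordiv s m)
             ++ List.replicate (PySem.Int.mod s m).toNat (PySem.Int.floordiv s m + 1) := by
  intro m
  induction m with
  | zero => intro h; omega
  | succ k ih =>
    intro _ s ans0
    have hm : (0 : Int) < (k : Int) + 1 := by positivity
    set q := PySem.Int.floordiv s ((k : Int) + 1) with hq
    set r := PySem.Int.mod s ((k : Int) + 1) with hr
    have hrq : q * ((k : Int) + 1) + r = s := PySem.Int.floordiv_mul_add_mod s _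
    have hr0 : 0 ≤ r := PySem.Int.mod_nonneg s hm
    have hrlt : r < (k : Int) + 1 := PySem.Int.mod_lt s hm
    rw [PySem.List.pyRange_neg_one_cons (by exact_mod_cast hm)]
    simp only [List.foldl_cons]
    push_cast
    rw [← hq, show ((k:Int)+1-1) = (k:Int) by ring]
    rcases Nat.eq_zero_or_pos k with hk | hk
    · -- m = 1: no recursive step, r = 0, q = s
      subst hk
      rw [PySem.List.pyRange_neg_one_eq_nil (by norm_num)]
      simp
    · have hkpos : (0 : Int) < (k : Int) := by exact_mod_cast hk
      rw [ih hk (s - q) (ans0 ++ [q])]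
      -- characterise floordiv/mod of the shrunk budget s - q over k slots
      have hsq : s - q = q * (k : Int) + r := by linarith
      by_cases hcase : r = (k : Int)
      · have hfd : PySem.Int.floordiv (s - q) (k : Int) = q + 1 := by
          rw [(PySem.Int.floordiv_eq_iff_of_pos hkpos)]
          constructor <;> nlinarith
        have hmd : PySem.Int.mod (s - q) (k : Int) = 0 := by
          have := PySem.Int.floordiv_mul_add_mod (s - q) (k : Int)
          rw [hfd] at this; nlinarith
        rw [hfd, hmd]
        have hre : s % ((k : Int) + 1) = r := (PySem.Int.mod_eq_emod_of_pos hm).symm.trans hr.symm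
        have h2 : r.toNat = k := by omega
        simp [hre, h2, show k + 1 - k = 1 by omega]
      · have hrk : r < (k : Int) := lt_of_le_of_ne (by omega) hcase
        have hfd : PySem.Int.floordiv (s - q) (k : Int) = q := by
          rw [(PySem.Int.floordiv_eq_iff_of_pos hkpos)]
          constructor <;> nlinarith
        have hmd : PySem.Int.mod (s - q) (k : Int) = r := by
          have := PySem.Int.floordiv_mul_add_mod (s - q) (k : Int)
          rw [hfd] at this; nlinarith
        rw [hfd, hmd]
        have h3 : k + 1 - r.toNat = (k - r.toNat) + 1 := by omega
        rw [← hr, h3, List.replicate_succ]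
        simp

theorem solution_spec : Claim_equal_solution := by
  intro n s _ hpre
  unfold Spec_solution solution solution_alt
  by_cases hg : n > s
  · simp [hg]
  · simp only [hg, if_false]
    rcases lt_trichotomy n 0 with hn | hn | hn
    · -- n < 0: A's both loops are empty, B's loop is empty
      have hm := PySem.Int.mod_neg_bounds s hn
      rw [PySem.List.pyRange_one_eq_nil (by omega), PySem.List.pyRange_one_eq_nil (by omega),
        PySem.List.pyRange_neg_one_eq_nil (by omega)]
      simp
    · exact absurd ⟨hn, by omega⟩ hpre
    · -- n > 0
      have hm0 := PySem.Int.mod_nonneg s hn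
      have hml := PySem.Int.mod_lt s hn
      have hbuild : (PySem.List.pyRange 0 n 1).foldl (fun acc _ => acc ++ [PySem.Int.floordiv s n]) []
          = List.replicate n.toNat (PySem.Int.floordiv s n) := by
        rw [PySem.List.pyRange_one, List.foldl_map]
        rw [show ((List.range (n - 0).toNat).foldl (fun acc _ => acc ++ [PySem.Int.floordiv s n]) [])
            = (List.range (n - 0).toNat).foldl (fun acc x => acc ++ [(fun _ => PySem.Int.floordiv s n) x]) [] from rfl]
        rw [PySem.List.foldl_append_singleton_eq_map]
        simp [List.map_const']
      simp only [hbuild, List.length_replicate]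
      rw [PySem.List.pyRange_one, List.foldl_map, Int.sub_zero]
      rw [solution_loop (PySem.Int.floordiv s n) (PySem.Int.mod s n).toNat n.toNat (by omega)]
      have := solution_greedy n.toNat (by omega) s []
      rw [show ((n.toNat : Int)) = n by omega] at this
      simp only [List.nil_append] at this
      exact this.symm

-- ===== VERDICT (by name: the statement is the Claim_ definition above) =====
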